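-- pv_equiv track=rewrite | github.com/lucasrp/edge-of-chaos | tools/curadoria_compute.py | apply_strategic_veto
-- ===== SOURCE A (Python) =====
-- def apply_strategic_veto(archive_auto, strengthen_targets, active_threads, recent_gaps):
--     """Suppress archive of docs related to active threads or recent gaps."""
--     suppressed = []
--
--     remaining_archive = []
--     for doc in archive_auto:
--         title_lower = (doc.get("title") or "").lower()
--         matched_thread = None
--         for thread in active_threads:
--             if thread.lower() in title_lower:
--                 matched_thread = thread
--                 break
--         matched_gap = None
--         if not matched_thread:
--             for gap in recent_gaps:
--                 if gap.lower() in title_lower: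
--                     matched_gap = gap
--                     break
--
--         if matched_thread or matched_gap:
--             suppressed.append({
--                 "doc_id": doc["doc_id"],
--                 "title": doc.get("title", ""),
--                 "matching_thread": matched_thread or matched_gap,
--                 "original_action": "ARCHIVE",
--             })
--         else:
--             remaining_archive.append(doc)
--
--     return remaining_archive, suppressed
-- ===== SOURCE B (Python) =====
-- def apply_strategic_veto(archive_auto, strengthen_targets, active_threads, recent_gaps):
--     """Suppress archive of docs related to active threads or recent gaps.
--
--     Inverted-loop formulation: lowercase every title and every pattern once,
--     then sweep the unified pattern list (threads first, then gaps) over all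
--     titles, recording for each doc the first pattern that matches; a final
--     pass partitions the docs by that table.
--     """
--     titles = [(doc.get("title") or "").lower() for doc in archive_auto]
--     patterns = list(active_threads) + list(recent_gaps)
--     first_match = {}
--     for pat in patterns:
--         pl = pat.lower()
--         for i, tl in enumerate(titles):
--             if i not in first_match and pl in tl:
--                 first_match[i] = pat
--     remaining_archive = []
--     suppressed = []
--     for i, doc in enumerate(archive_auto):
--         pat = first_match.get(i)
--         if pat is None:
--             remaining_archive.append(doc)
--         else:
--             suppressed.append({
--                 "doc_id": doc["doc_id"],
--                 "title": doc.get("title", ""),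
--                 "matching_thread": pat,
--                 "original_action": "ARCHIVE",
--             })
--     return remaining_archive, suppressed
-- ===== Notes on version B (the rewrite author's own statement) =====
-- stated objective: alternative
-- what changed: Replaces A's doc-major double scan (re-lowercasing every thread/gap pattern for every doc) by a pattern-major sweep: titles and patterns are lowercased once, one pass per pattern fills a first-match table keyed by doc index, and a final pass partitions the docs by that table.
-- outside the precondition, e.g. on apply_strategic_veto([{}], [], [''], []): A returns ([{}], []), B raises KeyError
import Mathlib
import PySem

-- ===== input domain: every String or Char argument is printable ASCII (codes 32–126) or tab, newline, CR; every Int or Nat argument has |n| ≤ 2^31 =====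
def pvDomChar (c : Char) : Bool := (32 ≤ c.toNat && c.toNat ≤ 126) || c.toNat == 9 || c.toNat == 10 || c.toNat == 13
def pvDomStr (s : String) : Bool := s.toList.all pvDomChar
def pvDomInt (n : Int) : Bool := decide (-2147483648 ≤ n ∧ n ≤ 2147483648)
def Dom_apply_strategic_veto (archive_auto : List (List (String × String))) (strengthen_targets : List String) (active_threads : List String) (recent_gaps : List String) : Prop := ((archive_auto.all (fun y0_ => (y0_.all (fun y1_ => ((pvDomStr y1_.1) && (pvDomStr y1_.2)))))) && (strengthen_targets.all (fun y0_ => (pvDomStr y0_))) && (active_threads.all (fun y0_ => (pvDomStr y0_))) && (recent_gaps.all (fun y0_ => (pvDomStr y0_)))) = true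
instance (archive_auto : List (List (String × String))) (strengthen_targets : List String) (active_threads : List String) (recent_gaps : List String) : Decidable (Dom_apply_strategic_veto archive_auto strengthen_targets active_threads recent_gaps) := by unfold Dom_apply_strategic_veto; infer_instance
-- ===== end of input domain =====

-- B replaces A's per-doc rescan of both pattern lists (re-lowercasing every pattern for every doc) by one
-- pattern-major sweep that lowercases titles and patterns once and records each doc's first matching pattern
-- in a table; same return value on Pre_ (alternative formulation, no measured speed claim).

-- ===== PORT A =====
-- Python truthiness of `matched_thread` / `matched_gap` (None or "" is falsy).
def pvTruthy (o : Option String) : Bool := (o.getD "") != ""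

-- doc["doc_id"] raises KeyError when the key is absent; ported as get?/getD "" with those inputs excluded by Pre_.
def apply_strategic_veto (archive_auto : List (List (String × String))) (strengthen_targets : List String) (active_threads : List String) (recent_gaps : List String) : (List (List (String × String))) × (List (List (String × String))) :=
  archive_auto.foldl (fun st doc =>
    let d := PySem.Dict.mk doc
    let title_lower := PySem.Str.lower ((d.get? "title").getD "")
    let matched_thread := active_threads.find? (fun thread => PySem.Str.isIn (PySem.Str.lower thread) title_lower)
    let matched_gap := if pvTruthy matched_thread then none
      else recent_gaps.find? (fun gap => PySem.Str.isIn (PySem.Str.lower gap) title_lower)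
    if pvTruthy matched_thread || pvTruthy matched_gap then
      (st.1, st.2 ++ [[("doc_id", (d.get? "doc_id").getD ""),
                       ("title", (d.get? "title").getD ""),
                       ("matching_thread", if pvTruthy matched_thread then matched_thread.getD "" else matched_gap.getD ""),
                       ("original_action", "ARCHIVE")]])
    else (st.1 ++ [doc], st.2))
    ([], [])

-- ===== PORT B =====
-- the inner loop of B: `if i not in first_match and pl in tl: first_match[i] = pat`
def pvStep (pl pat : String) (fm : PySem.Dict Int String) (it : Int × String) : PySem.Dict Int String :=
  if !fm.contains it.1 && PySem.Str.isIn pl it.2 then fm.insert it.1 pat else fm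

def apply_strategic_veto_alt (archive_auto : List (List (String × String))) (strengthen_targets : List String) (active_threads : List String) (recent_gaps : List String) : (List (List (String × String))) × (List (List (String × String))) :=
  let titles := archive_auto.map (fun doc => PySem.Str.lower (((PySem.Dict.mk doc).get? "title").getD ""))
  let patterns := active_threads ++ recent_gaps
  let first_match := patterns.foldl (fun fm pat => (PySem.List.enumerate titles).foldl (pvStep (PySem.Str.lower pat) pat) fm) PySem.Dict.empty
  (PySem.List.enumerate archive_auto).foldl (fun st idoc =>
    match first_match.get? idoc.1 with
    | none => (st.1 ++ [idoc.2], st.2)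
    | some pat =>
      let d := PySem.Dict.mk idoc.2
      (st.1, st.2 ++ [[("doc_id", (d.get? "doc_id").getD ""),
                       ("title", (d.get? "title").getD ""),
                       ("matching_thread", pat),
                       ("original_action", "ARCHIVE")]]))
    ([], [])

-- ===== PRECONDITION & SPEC =====
def pvMatchedDoc (active_threads recent_gaps : List String) (doc : List (String × String)) : Bool :=
  (active_threads ++ recent_gaps).any (fun p => PySem.Str.isIn (PySem.Str.lower p) (PySem.Str.lower (((PySem.Dict.mk doc).get? "title").getD "")))

-- Pre_ excludes (a) inputs where a doc whose title matches some pattern lacks a "doc_id" key — there Python A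
-- (and B) raise KeyError — and (b) inputs with an empty-string pattern, a corner no caller would specify, on
-- which A's truthiness test `matched_thread or matched_gap` accidentally discards a successful match while B
-- honours it; both behaviours are defensible there.
def Pre_apply_strategic_veto (archive_auto : List (List (String × String))) (strengthen_targets : List String) (active_threads : List String) (recent_gaps : List String) : Prop :=
  "" ∉ active_threads ∧ "" ∉ recent_gaps ∧
  ∀ doc ∈ archive_auto, pvMatchedDoc active_threads recent_gaps doc = true → (PySem.Dict.mk doc).contains "doc_id" = true
instance (archive_auto : List (List (String × String))) (strengthen_targets : List String) (active_threads : List String) (recent_gaps : List String) : Decidable (Pre_apply_strategic_veto archive_auto strengthen_targets active_threads recent_gaps) := by unfold Pre_apply_strategic_veto; infer_instance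

def pvWitness_apply_strategic_veto : (List (List (String × String))) × List String × List String × List String :=
  ([[("doc_id", "1"), ("title", "Alpha report")], [("doc_id", "2"), ("title", "misc")]], ["x"], ["alpha"], ["gap"])

def Spec_apply_strategic_veto (archive_auto : List (List (String × String))) (strengthen_targets : List String) (active_threads : List String) (recent_gaps : List String) (out : (List (List (String × String))) × (List (List (String × String)))) : Prop := out = apply_strategic_veto_alt archive_auto strengthen_targets active_threads recent_gaps
instance (archive_auto : List (List (String × String))) (strengthen_targets : List String) (active_threads : List String) (recent_gaps : List String) (out : (List (List (String × String))) × (List (List (String × String)))) : Decidable (Spec_apply_strategic_veto archive_auto strengthen_targets active_threads recent_gaps out) := by unfold Spec_apply_strategic_veto; infer_instance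

-- ===== CLAIM (what is proved, stated in full; the proofs are below) =====
def Claim_equal_apply_strategic_veto : Prop := ∀ (archive_auto : List (List (String × String))) (strengthen_targets : List String) (active_threads : List String) (recent_gaps : List String), Dom_apply_strategic_veto archive_auto strengthen_targets active_threads recent_gaps → Pre_apply_strategic_veto archive_auto strengthen_targets active_threads recent_gaps → Spec_apply_strategic_veto archive_auto strengthen_targets active_threads recent_gaps (apply_strategic_veto archive_auto strengthen_targets active_threads recent_gaps)

-- ===== LEMMAS AND PROOFS =====

-- the pattern `pat` hits position j of the (lowered) title list `l` that starts at index k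
def pvHit (pat : String) : List String → Int → Int → Option String
  | [], _, _ => none
  | t :: ts, k, j =>
    if j = k then (if PySem.Str.isIn (PySem.Str.lower pat) t then some pat else none)
    else pvHit pat ts (k + 1) j

-- first pattern of `ps` hitting position j
def pvFirst (titles : List String) : List String → Int → Option String
  | [], _ => none
  | p :: ps, j => (pvHit p titles 0 j).or (pvFirst titles ps j)

lemma pvHit_lt (pat : String) (l : List String) (k j : Int) (h : j < k) :
    pvHit pat l k j = none := by
  induction l generalizing k with
  | nil => rfl
  | cons t ts ih =>
    rw [pvHit, if_neg (by omega)]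
    exact ih (k + 1) (by omega)

lemma pvInner (pat : String) (l : List String) (k : Int) (d : PySem.Dict Int String) (j : Int) :
    ((PySem.List.enumerate l k).foldl (pvStep (PySem.Str.lower pat) pat) d).get? j
      = (d.get? j).or (pvHit pat l k j) := by
  induction l generalizing k d with
  | nil => simp [PySem.List.enumerate_nil, pvHit]
  | cons t ts ih =>
    rw [PySem.List.enumerate_cons, List.foldl_cons, ih]
    by_cases hj : j = k
    · subst hj
      rw [pvHit, if_pos rfl, pvHit_lt pat ts (j + 1) j (by omega), Option.or_none]
      by_cases hc : (!d.contains j && PySem.Str.isIn (PySem.Str.lower pat) t) = true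
      · have hmatch : PySem.Str.isIn (PySem.Str.lower pat) t = true := by
          simp only [Bool.and_eq_true] at hc; exact hc.2
        have hnone : d.get? j = none := by
          simp only [Bool.and_eq_true, Bool.not_eq_true'] at hc
          have := PySem.Dict.contains_eq_isSome_get? d j
          rw [hc.1] at this
          exact Option.not_isSome_iff_eq_none.mp (by rw [← this]; simp)
        rw [pvStep, if_pos hc, PySem.Dict.get?_insert_self, hnone, hmatch, if_pos rfl]
        simp
      · rw [pvStep, if_neg hc]
        simp only [Bool.and_eq_true, Bool.not_eq_true'] at hc
        rcases Bool.eq_false_or_eq_true (d.contains j) with hct | hct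
        · -- contains true: d.get? j is some, the .or ignores its second argument (handled below)
          have : (d.get? j).isSome = true := by
            rw [← PySem.Dict.contains_eq_isSome_get?]; exact hct
          rcases Option.isSome_iff_exists.mp this with ⟨v, hv⟩
          rw [hv]; simp
        · -- contains false, so the match must be false
          have hm : PySem.Str.isIn (PySem.Str.lower pat) t = false := by
            rcases Bool.eq_false_or_eq_true (PySem.Str.isIn (PySem.Str.lower pat) t) with hm | hm
            · exact absurd ⟨hct, hm⟩ hc
            · exact hm
          rw [hm]
          simp
    · rw [pvHit, if_neg hj]
      have hstep : (pvStep (PySem.Str.lower pat) pat d (k, t)).get? j = d.get? j := by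
        rw [pvStep]
        split
        · exact PySem.Dict.get?_insert_of_ne d pat hj
        · rfl
      rw [hstep]

lemma pvOuter (titles : List String) (ps : List String) (d : PySem.Dict Int String) (j : Int) :
    (ps.foldl (fun fm pat => (PySem.List.enumerate titles).foldl (pvStep (PySem.Str.lower pat) pat) fm) d).get? j
      = (d.get? j).or (pvFirst titles ps j) := by
  induction ps generalizing d with
  | nil => simp [pvFirst]
  | cons p ps ih =>
    rw [List.foldl_cons, ih, pvInner, Option.or_assoc, pvFirst]

lemma pvHit_at (pat : String) (l : List String) (k : Int) (m : Nat) (h : m < l.length) :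
    pvHit pat l k (k + (m : Int))
      = if PySem.Str.isIn (PySem.Str.lower pat) l[m] then some pat else none := by
  induction l generalizing k m with
  | nil => simp at h
  | cons t ts ih =>
    cases m with
    | zero => simp [pvHit]
    | succ n =>
      rw [pvHit, if_neg (by push_cast; omega)]
      have : k + ((n + 1 : Nat) : Int) = (k + 1) + (n : Int) := by push_cast; omega
      rw [this]
      simpa using ih (k + 1) n (by simpa using h)

lemma pvFirst_at (titles : List String) (ps : List String) (m : Nat) (h : m < titles.length) :
    pvFirst titles ps (m : Int)
      = ps.find? (fun p => PySem.Str.isIn (PySem.Str.lower p) titles[m]) := by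
  induction ps with
  | nil => simp [pvFirst]
  | cons p ps ih =>
    rw [pvFirst, ih]
    have h0 : pvHit p titles 0 ((m : Int))
        = if PySem.Str.isIn (PySem.Str.lower p) titles[m] then some p else none := by
      have := pvHit_at p titles 0 m h
      simpa using this
    rw [h0, List.find?_cons]
    cases hm : PySem.Str.isIn (PySem.Str.lower p) titles[m] with
    | true => simp
    | false => simp

lemma pvTruthy_some_of_ne {t : String} (h : t ≠ "") : pvTruthy (some t) = true := by
  simp [pvTruthy, h]

-- the central fold equality: A's doc-major loop equals B's final pass, given that the table agrees with
-- per-doc first-match over the concatenated pattern list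
lemma pvFoldEq (ats rgs : List String) (hth : "" ∉ ats) (hgp : "" ∉ rgs)
    (fm : PySem.Dict Int String) :
    ∀ (docs : List (List (String × String))) (k : Int)
      (_ : ∀ (m : Nat) (h : m < docs.length),
        fm.get? (k + (m : Int)) = (ats ++ rgs).find?
          (fun p => PySem.Str.isIn (PySem.Str.lower p)
            (PySem.Str.lower (((PySem.Dict.mk docs[m]).get? "title").getD ""))))
      (acc : List (List (String × String)) × List (List (String × String))),
    docs.foldl (fun st doc =>
      let d := PySem.Dict.mk doc
      let title_lower := PySem.Str.lower ((d.get? "title").getD "")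
      let matched_thread := ats.find? (fun thread => PySem.Str.isIn (PySem.Str.lower thread) title_lower)
      let matched_gap := if pvTruthy matched_thread then none
        else rgs.find? (fun gap => PySem.Str.isIn (PySem.Str.lower gap) title_lower)
      if pvTruthy matched_thread || pvTruthy matched_gap then
        (st.1, st.2 ++ [[("doc_id", (d.get? "doc_id").getD ""),
                         ("title", (d.get? "title").getD ""),
                         ("matching_thread", if pvTruthy matched_thread then matched_thread.getD "" else matched_gap.getD ""),
                         ("original_action", "ARCHIVE")]])
      else (st.1 ++ [doc], st.2)) acc
    = (PySem.List.enumerate docs k).foldl (fun st idoc =>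
        match fm.get? idoc.1 with
        | none => (st.1 ++ [idoc.2], st.2)
        | some pat =>
          let d := PySem.Dict.mk idoc.2
          (st.1, st.2 ++ [[("doc_id", (d.get? "doc_id").getD ""),
                           ("title", (d.get? "title").getD ""),
                           ("matching_thread", pat),
                           ("original_action", "ARCHIVE")]])) acc := by
  intro docs
  induction docs with
  | nil => intro k hfm acc; simp [PySem.List.enumerate_nil]
  | cons doc rest ih =>
    intro k hfm acc
    rw [PySem.List.enumerate_cons, List.foldl_cons, List.foldl_cons]
    have hk : fm.get? k = (ats ++ rgs).find?
        (fun p => PySem.Str.isIn (PySem.Str.lower p)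
          (PySem.Str.lower (((PySem.Dict.mk doc).get? "title").getD ""))) := by
      have := hfm 0 (by simp)
      simpa using this
    rw [List.find?_append] at hk
    have hrest : ∀ (m : Nat) (h : m < rest.length),
        fm.get? ((k + 1) + (m : Int)) = (ats ++ rgs).find?
          (fun p => PySem.Str.isIn (PySem.Str.lower p)
            (PySem.Str.lower (((PySem.Dict.mk rest[m]).get? "title").getD ""))) := by
      intro m h
      have := hfm (m + 1) (by simpa using Nat.succ_lt_succ h)
      have heq : k + ((m + 1 : Nat) : Int) = (k + 1) + (m : Int) := by push_cast; omega
      rw [heq] at this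
      simpa using this
    -- show the two step functions produce the same new accumulator
    have hstep :
        (let d := PySem.Dict.mk doc
         let title_lower := PySem.Str.lower ((d.get? "title").getD "")
         let matched_thread := ats.find? (fun thread => PySem.Str.isIn (PySem.Str.lower thread) title_lower)
         let matched_gap := if pvTruthy matched_thread then none
           else rgs.find? (fun gap => PySem.Str.isIn (PySem.Str.lower gap) title_lower)
         if pvTruthy matched_thread || pvTruthy matched_gap then
           (acc.1, acc.2 ++ [[("doc_id", (d.get? "doc_id").getD ""),
                            ("title", (d.get? "title").getD ""),
                            ("matching_thread", if pvTruthy matched_thread then matched_thread.getD "" else matched_gap.getD ""),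
                            ("original_action", "ARCHIVE")]])
         else (acc.1 ++ [doc], acc.2))
        = (match fm.get? k with
           | none => (acc.1 ++ [doc], acc.2)
           | some pat =>
             (acc.1, acc.2 ++ [[("doc_id", ((PySem.Dict.mk doc).get? "doc_id").getD ""),
                              ("title", ((PySem.Dict.mk doc).get? "title").getD ""),
                              ("matching_thread", pat),
                              ("original_action", "ARCHIVE")]])) := by
      rw [hk]
      cases hmt : List.find? (fun thread => PySem.Str.isIn (PySem.Str.lower thread)
          (PySem.Str.lower (((PySem.Dict.mk doc).get? "title").getD ""))) ats with
      | some t =>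
        have htr : pvTruthy (some t) = true :=
          pvTruthy_some_of_ne (fun he => hth (he ▸ List.mem_of_find?_eq_some hmt))
        simp only [hmt, htr, Bool.true_or, reduceIte, Option.some_or, Option.getD_some]
      | none =>
        cases hmg : List.find? (fun gap => PySem.Str.isIn (PySem.Str.lower gap)
            (PySem.Str.lower (((PySem.Dict.mk doc).get? "title").getD ""))) rgs with
        | some g =>
          have hgB : (g != "") = true :=
            bne_iff_ne.mpr (fun he => hgp (he ▸ List.mem_of_find?_eq_some hmg))
          simp only [hmt, hmg, pvTruthy, Option.getD_none,
            bne_self_eq_false, Bool.false_or, Option.none_or]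
          simp [hgB]
        | none =>
          simp only [hmt, hmg, pvTruthy, Option.getD_none, bne_self_eq_false,
            Bool.false_or, Option.none_or]
          simp
    rw [hstep]
    exact ih (k + 1) hrest _

-- ===== VERDICT (by name: the statement is the Claim_ definition above) =====
theorem apply_strategic_veto_spec : Claim_equal_apply_strategic_veto := by
  intro archive_auto strengthen_targets active_threads recent_gaps _ hPre
  obtain ⟨hth, hgp, _⟩ := hPre
  unfold Spec_apply_strategic_veto
  rw [apply_strategic_veto, apply_strategic_veto_alt]
  apply pvFoldEq active_threads recent_gaps hth hgp
  intro m h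
  rw [pvOuter, PySem.Dict.get?_empty, Option.none_or]
  have hml : m < (archive_auto.map (fun doc => PySem.Str.lower (((PySem.Dict.mk doc).get? "title").getD ""))).length := by
    simpa using h
  have := pvFirst_at (archive_auto.map (fun doc => PySem.Str.lower (((PySem.Dict.mk doc).get? "title").getD "")))
      (active_threads ++ recent_gaps) m hml
  simp only [List.getElem_map] at this
  simpa using this
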